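-- pv_equiv track=rewrite | github.com/rasca0027/Mahjong4RL | mahjong/yaku_calculator.py | filter_yaku
-- ===== SOURCE A (Python) =====
-- from typing import List, Tuple
--
-- def filter_yaku(
--         yakus: List[Tuple[str, int]]) -> List[Tuple[str, int]]:
--     """Filter out mutually exclusive yakus."""
--     YAKU_EXCLUDE_TABLE = {
--         'ippatsu': [],
--         'menzen_tsumo': [],
--         'tanyao': [],
--         'pinfu': [],
--         'iipeikou': [],
--         'ikkitsuukan': ['tanyao'],
--         'yakuhai': ['tanyao', 'pinfu'],
--         'sanshoku_doujun': ['ikkitsuukan'],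
--         'sanshoku_doukou': [
--             'pinfu', 'iipeikou', 'ikkitsuukan', 'sanshoku_doujun'],
--         'toitoihou': [
--             'pinfu', 'iipeikou', 'ikkitsuukan', 'sanshoku_doujun'],
--         'sanankou': [
--             'pinfu', 'iipeikou', 'ikkitsuukan', 'sanshoku_doujun'],
--         'sankantsu': [
--             'pinfu', 'iipeikou', 'ikkitsuukan', 'sanshoku_doujun'],
--         'chanta': ['tanyao', 'ikkitsuukan'],
--         'junchantaiyaochuu': ['tanyao', 'ikkitsuukan', 'yakuhai'],
--         'ryanpeikou': ['iipeikou', 'ikkitsuukan', 'yakuhai',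
--                        'sanshoku_doujun', 'sanshoku_doukou', 'toitoihou',
--                        'sanankou', 'sankantsu'],
--         'shousangen': ['tanyao', 'pinfu', 'ikkitsuukan', 'sanshoku_doujun',
--                        'sanshoku_doukou', 'junchantaiyaochuu',
--                        'ryanpeikou'],
--         'honroutou': ['tanyao', 'pinfu', 'iipeikou', 'ikkitsuukan',
--                       'sanshoku_doujun', 'chanta', 'ryanpeikou'],
--         'honiisou': ['sanshoku_doujun', 'sanshoku_doukou'],
--         'chiniisou': ['yakuhai', 'sanshoku_doujun', 'sanshoku_doukou',
--                       'shousangen', 'honroutou', 'honiisou'],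
--         'chiitoitsu': ['pinfu', 'iipeikou', 'ikkitsuukan', 'yakuhai',
--                        'sanshoku_doujun', 'sanshoku_doukou', 'toitoihou',
--                        'sanankou', 'sankantsu', 'junchantaiyaochuu',
--                        'ryanpeikou', 'shousangen'],
--         'rinshan_kaihou': ['ippatsu', 'pinfu', 'ryanpeikou', 'chiitoitsu'],
--         'haitei_raoyue': ['rinshan_kaihou'],
--         'houtei_raoyui': ['ippatsu', 'menzen_tsumo', 'rinshan_kaihou',
--                           'haitei_raoyue'],
--         'chankan': ['menzen_tsumo', 'toitoihou', 'ryanpeikou', 'honroutou',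
--                     'chiitoitsu', 'rinshan_kaihou', 'haitei_raoyue',
--                     'houtei_raoyui']
--     }
--     yaku_list = [yaku for yaku, han in yakus]
--     for yaku_name in yaku_list:
--         if yaku_name in YAKU_EXCLUDE_TABLE:
--             excluded_yakus = YAKU_EXCLUDE_TABLE[yaku_name]
--             yakus = list(filter(
--                 lambda x: x[0] not in excluded_yakus, yakus))
--     return yakus
-- ===== SOURCE B (Python) =====
-- from typing import List, Tuple
--
-- # Flat (excluder, excluded) pair relation derived from A's YAKU_EXCLUDE_TABLE.
-- _EXCLUSION_PAIRS = [
--     ('ikkitsuukan', 'tanyao'),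
--     ('yakuhai', 'tanyao'),
--     ('yakuhai', 'pinfu'),
--     ('sanshoku_doujun', 'ikkitsuukan'),
--     ('sanshoku_doukou', 'pinfu'),
--     ('sanshoku_doukou', 'iipeikou'),
--     ('sanshoku_doukou', 'ikkitsuukan'),
--     ('sanshoku_doukou', 'sanshoku_doujun'),
--     ('toitoihou', 'pinfu'),
--     ('toitoihou', 'iipeikou'),
--     ('toitoihou', 'ikkitsuukan'),
--     ('toitoihou', 'sanshoku_doujun'),
--     ('sanankou', 'pinfu'),
--     ('sanankou', 'iipeikou'),
--     ('sanankou', 'ikkitsuukan'),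
--     ('sanankou', 'sanshoku_doujun'),
--     ('sankantsu', 'pinfu'),
--     ('sankantsu', 'iipeikou'),
--     ('sankantsu', 'ikkitsuukan'),
--     ('sankantsu', 'sanshoku_doujun'),
--     ('chanta', 'tanyao'),
--     ('chanta', 'ikkitsuukan'),
--     ('junchantaiyaochuu', 'tanyao'),
--     ('junchantaiyaochuu', 'ikkitsuukan'),
--     ('junchantaiyaochuu', 'yakuhai'),
--     ('ryanpeikou', 'iipeikou'),
--     ('ryanpeikou', 'ikkitsuukan'),
--     ('ryanpeikou', 'yakuhai'),
--     ('ryanpeikou', 'sanshoku_doujun'),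
--     ('ryanpeikou', 'sanshoku_doukou'),
--     ('ryanpeikou', 'toitoihou'),
--     ('ryanpeikou', 'sanankou'),
--     ('ryanpeikou', 'sankantsu'),
--     ('shousangen', 'tanyao'),
--     ('shousangen', 'pinfu'),
--     ('shousangen', 'ikkitsuukan'),
--     ('shousangen', 'sanshoku_doujun'),
--     ('shousangen', 'sanshoku_doukou'),
--     ('shousangen', 'junchantaiyaochuu'),
--     ('shousangen', 'ryanpeikou'),
--     ('honroutou', 'tanyao'),
--     ('honroutou', 'pinfu'),
--     ('honroutou', 'iipeikou'),
--     ('honroutou', 'ikkitsuukan'),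
--     ('honroutou', 'sanshoku_doujun'),
--     ('honroutou', 'chanta'),
--     ('honroutou', 'ryanpeikou'),
--     ('honiisou', 'sanshoku_doujun'),
--     ('honiisou', 'sanshoku_doukou'),
--     ('chiniisou', 'yakuhai'),
--     ('chiniisou', 'sanshoku_doujun'),
--     ('chiniisou', 'sanshoku_doukou'),
--     ('chiniisou', 'shousangen'),
--     ('chiniisou', 'honroutou'),
--     ('chiniisou', 'honiisou'),
--     ('chiitoitsu', 'pinfu'),
--     ('chiitoitsu', 'iipeikou'),
--     ('chiitoitsu', 'ikkitsuukan'),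
--     ('chiitoitsu', 'yakuhai'),
--     ('chiitoitsu', 'sanshoku_doujun'),
--     ('chiitoitsu', 'sanshoku_doukou'),
--     ('chiitoitsu', 'toitoihou'),
--     ('chiitoitsu', 'sanankou'),
--     ('chiitoitsu', 'sankantsu'),
--     ('chiitoitsu', 'junchantaiyaochuu'),
--     ('chiitoitsu', 'ryanpeikou'),
--     ('chiitoitsu', 'shousangen'),
--     ('rinshan_kaihou', 'ippatsu'),
--     ('rinshan_kaihou', 'pinfu'),
--     ('rinshan_kaihou', 'ryanpeikou'),
--     ('rinshan_kaihou', 'chiitoitsu'),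
--     ('haitei_raoyue', 'rinshan_kaihou'),
--     ('houtei_raoyui', 'ippatsu'),
--     ('houtei_raoyui', 'menzen_tsumo'),
--     ('houtei_raoyui', 'rinshan_kaihou'),
--     ('houtei_raoyui', 'haitei_raoyue'),
--     ('chankan', 'menzen_tsumo'),
--     ('chankan', 'toitoihou'),
--     ('chankan', 'ryanpeikou'),
--     ('chankan', 'honroutou'),
--     ('chankan', 'chiitoitsu'),
--     ('chankan', 'rinshan_kaihou'),
--     ('chankan', 'haitei_raoyue'),
--     ('chankan', 'houtei_raoyui'),
-- ]
--
--
-- def filter_yaku(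
--         yakus: List[Tuple[str, int]]) -> List[Tuple[str, int]]:
--     """Filter out mutually exclusive yakus: one pass over the pair relation."""
--     present = {name for name, _ in yakus}
--     banned = {e for k, e in _EXCLUSION_PAIRS if k in present}
--     return [(n, h) for n, h in yakus if n not in banned]
-- ===== Notes on version B (the rewrite author's own statement) =====
-- stated objective: alternative
-- what changed: B replaces A's dict-driven loop of N cumulative whole-list filter passes with a flat (excluder, excluded) pair relation scanned once against the set of present names, then a single final filter.
import Mathlib
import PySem

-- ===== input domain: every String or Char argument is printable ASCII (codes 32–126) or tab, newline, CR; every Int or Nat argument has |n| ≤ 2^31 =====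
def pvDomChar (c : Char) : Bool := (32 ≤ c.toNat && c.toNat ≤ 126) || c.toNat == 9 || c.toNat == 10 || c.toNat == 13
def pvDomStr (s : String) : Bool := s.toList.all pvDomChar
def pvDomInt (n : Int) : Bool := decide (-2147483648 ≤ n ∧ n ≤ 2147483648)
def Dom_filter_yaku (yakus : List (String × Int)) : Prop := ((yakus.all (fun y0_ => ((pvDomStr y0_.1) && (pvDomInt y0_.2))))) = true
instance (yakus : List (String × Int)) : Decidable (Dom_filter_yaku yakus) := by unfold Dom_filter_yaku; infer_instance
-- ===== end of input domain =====

-- B replaces A's per-yaku cumulative re-filtering of the list with one scan of a flat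
-- (excluder, excluded) pair relation against the set of present names, then one filter
-- (objective: alternative).

-- ===== PORT A =====
-- A's dict literal YAKU_EXCLUDE_TABLE
def yakuTableEntries : List (String × List String) := [
  ("ippatsu", []),
  ("menzen_tsumo", []),
  ("tanyao", []),
  ("pinfu", []),
  ("iipeikou", []),
  ("ikkitsuukan", ["tanyao"]),
  ("yakuhai", ["tanyao", "pinfu"]),
  ("sanshoku_doujun", ["ikkitsuukan"]),
  ("sanshoku_doukou", ["pinfu", "iipeikou", "ikkitsuukan", "sanshoku_doujun"]),
  ("toitoihou", ["pinfu", "iipeikou", "ikkitsuukan", "sanshoku_doujun"]),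
  ("sanankou", ["pinfu", "iipeikou", "ikkitsuukan", "sanshoku_doujun"]),
  ("sankantsu", ["pinfu", "iipeikou", "ikkitsuukan", "sanshoku_doujun"]),
  ("chanta", ["tanyao", "ikkitsuukan"]),
  ("junchantaiyaochuu", ["tanyao", "ikkitsuukan", "yakuhai"]),
  ("ryanpeikou", ["iipeikou", "ikkitsuukan", "yakuhai", "sanshoku_doujun", "sanshoku_doukou", "toitoihou", "sanankou", "sankantsu"]),
  ("shousangen", ["tanyao", "pinfu", "ikkitsuukan", "sanshoku_doujun", "sanshoku_doukou", "junchantaiyaochuu", "ryanpeikou"]),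
  ("honroutou", ["tanyao", "pinfu", "iipeikou", "ikkitsuukan", "sanshoku_doujun", "chanta", "ryanpeikou"]),
  ("honiisou", ["sanshoku_doujun", "sanshoku_doukou"]),
  ("chiniisou", ["yakuhai", "sanshoku_doujun", "sanshoku_doukou", "shousangen", "honroutou", "honiisou"]),
  ("chiitoitsu", ["pinfu", "iipeikou", "ikkitsuukan", "yakuhai", "sanshoku_doujun", "sanshoku_doukou", "toitoihou", "sanankou", "sankantsu", "junchantaiyaochuu", "ryanpeikou", "shousangen"]),
  ("rinshan_kaihou", ["ippatsu", "pinfu", "ryanpeikou", "chiitoitsu"]),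
  ("haitei_raoyue", ["rinshan_kaihou"]),
  ("houtei_raoyui", ["ippatsu", "menzen_tsumo", "rinshan_kaihou", "haitei_raoyue"]),
  ("chankan", ["menzen_tsumo", "toitoihou", "ryanpeikou", "honroutou", "chiitoitsu", "rinshan_kaihou", "haitei_raoyue", "houtei_raoyui"])]

def yakuExcludeTable : PySem.Dict String (List String) := PySem.Dict.mk yakuTableEntries

-- for yaku_name in yaku_list: if in table, yakus = filter(x[0] not in excluded_yakus, yakus)
def filter_yaku (yakus : List (String × Int)) : List (String × Int) :=
  let yaku_list := yakus.map (fun p => p.1)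
  yaku_list.foldl (fun ys yaku_name =>
    match yakuExcludeTable.get? yaku_name with
    | some excluded_yakus => ys.filter (fun x => !(excluded_yakus.contains x.1))
    | none => ys) yakus

-- ===== PORT B =====
-- B's flat pair relation _EXCLUSION_PAIRS
def exclusionPairs : List (String × String) := [
  ("ikkitsuukan", "tanyao"),
  ("yakuhai", "tanyao"),
  ("yakuhai", "pinfu"),
  ("sanshoku_doujun", "ikkitsuukan"),
  ("sanshoku_doukou", "pinfu"),
  ("sanshoku_doukou", "iipeikou"),
  ("sanshoku_doukou", "ikkitsuukan"),
  ("sanshoku_doukou", "sanshoku_doujun"),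
  ("toitoihou", "pinfu"),
  ("toitoihou", "iipeikou"),
  ("toitoihou", "ikkitsuukan"),
  ("toitoihou", "sanshoku_doujun"),
  ("sanankou", "pinfu"),
  ("sanankou", "iipeikou"),
  ("sanankou", "ikkitsuukan"),
  ("sanankou", "sanshoku_doujun"),
  ("sankantsu", "pinfu"),
  ("sankantsu", "iipeikou"),
  ("sankantsu", "ikkitsuukan"),
  ("sankantsu", "sanshoku_doujun"),
  ("chanta", "tanyao"),
  ("chanta", "ikkitsuukan"),
  ("junchantaiyaochuu", "tanyao"),
  ("junchantaiyaochuu", "ikkitsuukan"),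
  ("junchantaiyaochuu", "yakuhai"),
  ("ryanpeikou", "iipeikou"),
  ("ryanpeikou", "ikkitsuukan"),
  ("ryanpeikou", "yakuhai"),
  ("ryanpeikou", "sanshoku_doujun"),
  ("ryanpeikou", "sanshoku_doukou"),
  ("ryanpeikou", "toitoihou"),
  ("ryanpeikou", "sanankou"),
  ("ryanpeikou", "sankantsu"),
  ("shousangen", "tanyao"),
  ("shousangen", "pinfu"),
  ("shousangen", "ikkitsuukan"),
  ("shousangen", "sanshoku_doujun"),
  ("shousangen", "sanshoku_doukou"),
  ("shousangen", "junchantaiyaochuu"),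
  ("shousangen", "ryanpeikou"),
  ("honroutou", "tanyao"),
  ("honroutou", "pinfu"),
  ("honroutou", "iipeikou"),
  ("honroutou", "ikkitsuukan"),
  ("honroutou", "sanshoku_doujun"),
  ("honroutou", "chanta"),
  ("honroutou", "ryanpeikou"),
  ("honiisou", "sanshoku_doujun"),
  ("honiisou", "sanshoku_doukou"),
  ("chiniisou", "yakuhai"),
  ("chiniisou", "sanshoku_doujun"),
  ("chiniisou", "sanshoku_doukou"),
  ("chiniisou", "shousangen"),
  ("chiniisou", "honroutou"),
  ("chiniisou", "honiisou"),
  ("chiitoitsu", "pinfu"),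
  ("chiitoitsu", "iipeikou"),
  ("chiitoitsu", "ikkitsuukan"),
  ("chiitoitsu", "yakuhai"),
  ("chiitoitsu", "sanshoku_doujun"),
  ("chiitoitsu", "sanshoku_doukou"),
  ("chiitoitsu", "toitoihou"),
  ("chiitoitsu", "sanankou"),
  ("chiitoitsu", "sankantsu"),
  ("chiitoitsu", "junchantaiyaochuu"),
  ("chiitoitsu", "ryanpeikou"),
  ("chiitoitsu", "shousangen"),
  ("rinshan_kaihou", "ippatsu"),
  ("rinshan_kaihou", "pinfu"),
  ("rinshan_kaihou", "ryanpeikou"),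
  ("rinshan_kaihou", "chiitoitsu"),
  ("haitei_raoyue", "rinshan_kaihou"),
  ("houtei_raoyui", "ippatsu"),
  ("houtei_raoyui", "menzen_tsumo"),
  ("houtei_raoyui", "rinshan_kaihou"),
  ("houtei_raoyui", "haitei_raoyue"),
  ("chankan", "menzen_tsumo"),
  ("chankan", "toitoihou"),
  ("chankan", "ryanpeikou"),
  ("chankan", "honroutou"),
  ("chankan", "chiitoitsu"),
  ("chankan", "rinshan_kaihou"),
  ("chankan", "haitei_raoyue"),
  ("chankan", "houtei_raoyui")]

-- present = {name for name, _ in yakus}; banned = {e for k, e in PAIRS if k in present}; one filter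
def filter_yaku_alt (yakus : List (String × Int)) : List (String × Int) :=
  let present : PySem.Set String := PySem.Set.ofList (yakus.map (fun p => p.1))
  let banned : PySem.Set String :=
    PySem.Set.ofList ((exclusionPairs.filter (fun p => present.contains p.1)).map (fun p => p.2))
  yakus.filter (fun p => !(banned.contains p.1))

-- ===== PRECONDITION & SPEC =====
def Spec_filter_yaku (yakus : List (String × Int)) (out : List (String × Int)) : Prop := out = filter_yaku_alt yakus
instance (yakus : List (String × Int)) (out : List (String × Int)) : Decidable (Spec_filter_yaku yakus out) := by unfold Spec_filter_yaku; infer_instance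

-- ===== CLAIM =====
def Claim_equal_filter_yaku : Prop := ∀ (yakus : List (String × Int)), Dom_filter_yaku yakus → Spec_filter_yaku yakus (filter_yaku yakus)

-- ===== LEMMAS AND PROOFS =====

-- concatenation of all exclusion lists named by `names` (reference semantics for A's loop)
def exAll (names : List String) : List String :=
  match names with
  | [] => []
  | n :: ns => (match yakuExcludeTable.get? n with
                | some ex => ex
                | none => []) ++ exAll ns

-- A's cumulative re-filtering loop = one filter by membership in exAll
theorem foldlA_eq_filter (names : List String) (ys : List (String × Int)) :
    names.foldl (fun ys yaku_name =>
      match yakuExcludeTable.get? yaku_name with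
      | some excluded_yakus => ys.filter (fun x => !(excluded_yakus.contains x.1))
      | none => ys) ys
    = ys.filter (fun x => !((exAll names).contains x.1)) := by
  induction names generalizing ys with
  | nil => simp [exAll]
  | cons n ns ih =>
    simp only [List.foldl_cons]
    cases h : yakuExcludeTable.get? n with
    | none =>
      simp only [ih]
      apply List.filter_congr
      intro x _
      simp [exAll, h]
    | some ex =>
      simp only [ih, List.filter_filter]
      apply List.filter_congr
      intro x _
      simp [exAll, h, Bool.and_comm]

-- the dict lookup and the flat pair relation describe the same exclusion relation
-- generic: lookup-then-member in a nodup-keyed literal dict = membership in its flattened pair relation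
def flatPairs (l : List (String × List String)) : List (String × String) :=
  l.flatMap (fun kv => kv.2.map (fun e => (kv.1, e)))

theorem mem_flatPairs_key {l : List (String × List String)} {n y : String}
    (h : (n, y) ∈ flatPairs l) : n ∈ l.map (fun kv => kv.1) := by
  induction l with
  | nil => simp [flatPairs] at h
  | cons kv rest ih =>
    simp only [flatPairs, List.flatMap_cons, List.mem_append, List.mem_map] at h
    rcases h with ⟨e, _, he⟩ | h
    · injection he with h1 h2; subst h1; exact List.mem_cons_self
    · exact List.mem_cons_of_mem _ (ih h)

theorem mem_getd_iff_flatPairs (l : List (String × List String)) (n y : String)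
    (hnd : (l.map (fun kv => kv.1)).Nodup) :
    (y ∈ (match (PySem.Dict.mk l).get? n with | some ex => ex | none => ([] : List String)))
    ↔ (n, y) ∈ flatPairs l := by
  induction l with
  | nil => simp [PySem.Dict.get?, flatPairs]
  | cons kv rest ih =>
    simp only [List.map_cons, List.nodup_cons] at hnd
    rw [PySem.Dict.get?_mk_cons]
    by_cases hk : kv.1 = n
    · subst hk
      simp only [BEq.rfl]
      simp only [flatPairs, List.flatMap_cons, List.mem_append, List.mem_map]
      constructor
      · intro hy; exact Or.inl ⟨y, hy, rfl⟩
      · rintro (⟨e, he, heq⟩ | h)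
        · cases heq; exact he
        · exact absurd (mem_flatPairs_key h) hnd.1
    · have : (kv.1 == n) = false := by simp [hk]
      simp only [this, Bool.false_eq_true, if_false]
      simp only [flatPairs, List.flatMap_cons, List.mem_append, List.mem_map]
      rw [ih hnd.2]
      constructor
      · exact Or.inr
      · rintro (⟨e, _, heq⟩ | h)
        · exact absurd (congrArg Prod.fst heq) hk
        · exact h

theorem mem_tbl_iff_pairs (n y : String) :
    (y ∈ (match yakuExcludeTable.get? n with | some ex => ex | none => ([] : List String)))
    ↔ (n, y) ∈ exclusionPairs := by
  have hflat : exclusionPairs = flatPairs yakuTableEntries := by rfl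
  rw [hflat, yakuExcludeTable]
  exact mem_getd_iff_flatPairs yakuTableEntries n y (by decide)

-- membership in exAll = some pair whose excluder is among the names
theorem mem_exAll (names : List String) (y : String) :
    y ∈ exAll names ↔ ∃ n ∈ names, (n, y) ∈ exclusionPairs := by
  induction names with
  | nil => simp [exAll]
  | cons n ns ih =>
    simp only [exAll, List.mem_append, ih, List.mem_cons]
    rw [mem_tbl_iff_pairs]
    constructor
    · rintro (h | ⟨m, hm, hp⟩)
      · exact ⟨n, Or.inl rfl, h⟩
      · exact ⟨m, Or.inr hm, hp⟩
    · rintro ⟨m, (rfl | hm), hp⟩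
      · exact Or.inl hp
      · exact Or.inr ⟨m, hm, hp⟩

-- ===== VERDICT =====
theorem filter_yaku_spec : Claim_equal_filter_yaku := by
  intro yakus _
  unfold Spec_filter_yaku filter_yaku filter_yaku_alt
  rw [foldlA_eq_filter]
  apply List.filter_congr
  intro x _
  congr 1
  rw [Bool.eq_iff_iff]
  simp only [List.contains_iff_mem, PySem.Set.contains, PySem.Set.mem_ofList,
    List.mem_map, List.mem_filter, mem_exAll]
  constructor
  · rintro ⟨n, hn, hp⟩
    exact ⟨(n, x.1), ⟨hp, hn⟩, rfl⟩
  · rintro ⟨⟨k, e⟩, ⟨hp, hk⟩, he⟩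
    exact ⟨k, hk, he ▸ hp⟩
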